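-- pv_equiv track=rewrite | github.com/PRX-Kinodynamic/Generative-Motion-Planner | genMoPlan/datasets/acrobot.py | _get_possible_variation_types
-- ===== SOURCE A (Python) =====
-- from enum import Enum
--
-- class TrajectoryBoundsType(Enum):
--     LT_2PI = 0
--     GT_N2PI = 1
--     GT_0 = 2
--     LT_0 = 3
--
-- class HorizonVariationType(Enum):
--     BASE = 0
--     INVERTED = 1
--     PLUS_2PI = 2
--     MINUS_2PI = 3
--     INV_PLUS_2PI = 4
--     INV_MINUS_2PI = 5
--     PLUS_4PI = 6
--     MINUS_4PI = 7
--     INV_PLUS_4PI = 8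
--     INV_MINUS_4PI = 9
--
-- def _get_possible_variation_types(bound_flags):
--     """Get possible variation types based on bound flags."""
--     possible_variation_types = [
--         HorizonVariationType.BASE.value,
--         HorizonVariationType.INVERTED.value
--     ]
--
--     has_lt_2pi = False
--     has_gt_n2pi = False
--     has_gt_0 = False
--     has_lt_0 = False
--
--     for flag_val in bound_flags:
--         if flag_val == TrajectoryBoundsType.LT_2PI.value:
--             has_lt_2pi = True
--         elif flag_val == TrajectoryBoundsType.GT_N2PI.value:
--             has_gt_n2pi = True
--         elif flag_val == TrajectoryBoundsType.GT_0.value: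
--             has_gt_0 = True
--         elif flag_val == TrajectoryBoundsType.LT_0.value:
--             has_lt_0 = True
--
--     if has_lt_2pi:
--         possible_variation_types.append(HorizonVariationType.PLUS_2PI.value)
--         possible_variation_types.append(HorizonVariationType.INV_PLUS_2PI.value)
--
--     if has_gt_n2pi:
--         possible_variation_types.append(HorizonVariationType.INV_MINUS_2PI.value)
--         possible_variation_types.append(HorizonVariationType.MINUS_2PI.value)
--
--     if has_gt_0:
--         possible_variation_types.append(HorizonVariationType.MINUS_4PI.value)
--         possible_variation_types.append(HorizonVariationType.INV_MINUS_4PI.value)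
--
--     if has_lt_0:
--         possible_variation_types.append(HorizonVariationType.PLUS_4PI.value)
--         possible_variation_types.append(HorizonVariationType.INV_PLUS_4PI.value)
--
--     return possible_variation_types
-- ===== SOURCE B (Python) =====
-- from enum import Enum
--
-- class TrajectoryBoundsType(Enum):
--     LT_2PI = 0
--     GT_N2PI = 1
--     GT_0 = 2
--     LT_0 = 3
--
-- class HorizonVariationType(Enum):
--     BASE = 0
--     INVERTED = 1
--     PLUS_2PI = 2
--     MINUS_2PI = 3
--     INV_PLUS_2PI = 4
--     INV_MINUS_2PI = 5
--     PLUS_4PI = 6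
--     MINUS_4PI = 7
--     INV_PLUS_4PI = 8
--     INV_MINUS_4PI = 9
--
-- # Extra variation types for each of the 16 possible combinations of bound
-- # flags, indexed by the bitmask (bit i set <=> flag value i present).
-- _SUFFIX = [
--     [], [2, 4], [5, 3], [2, 4, 5, 3],
--     [7, 9], [2, 4, 7, 9], [5, 3, 7, 9], [2, 4, 5, 3, 7, 9],
--     [6, 8], [2, 4, 6, 8], [5, 3, 6, 8], [2, 4, 5, 3, 6, 8],
--     [7, 9, 6, 8], [2, 4, 7, 9, 6, 8], [5, 3, 7, 9, 6, 8], [2, 4, 5, 3, 7, 9, 6, 8],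
-- ]
--
-- def _get_possible_variation_types(bound_flags):
--     """Get possible variation types based on bound flags."""
--     mask = 0
--     for flag_val in bound_flags:
--         if 0 <= flag_val <= 3:
--             mask |= 1 << flag_val
--     return [HorizonVariationType.BASE.value, HorizonVariationType.INVERTED.value] + _SUFFIX[mask]
-- ===== Notes on version B (the rewrite author's own statement) =====
-- stated objective: alternative
-- what changed: B encodes the presence of the four flag values as a 4-bit mask accumulated with bitwise OR and returns [BASE, INVERTED] plus a precomputed 16-entry suffix table indexed by that mask, replacing A's four booleans and four conditional append blocks; the simpler loop body (one comparison chain and an OR vs a four-way elif chain) gives a constant-factor speedup.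
import Mathlib
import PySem

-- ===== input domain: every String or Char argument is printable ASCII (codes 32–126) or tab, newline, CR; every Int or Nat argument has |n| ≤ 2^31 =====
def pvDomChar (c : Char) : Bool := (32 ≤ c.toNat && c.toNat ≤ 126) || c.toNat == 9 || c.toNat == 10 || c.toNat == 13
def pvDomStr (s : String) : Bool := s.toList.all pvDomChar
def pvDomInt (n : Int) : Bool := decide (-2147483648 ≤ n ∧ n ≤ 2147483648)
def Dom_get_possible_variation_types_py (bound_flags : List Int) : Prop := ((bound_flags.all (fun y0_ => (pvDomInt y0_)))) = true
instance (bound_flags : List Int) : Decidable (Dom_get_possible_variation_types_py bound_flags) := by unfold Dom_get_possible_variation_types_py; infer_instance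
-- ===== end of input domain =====

-- B replaces A's four boolean accumulators and four conditional append blocks with a 4-bit
-- presence mask accumulated by bitwise OR and a precomputed 16-entry suffix table indexed by
-- the mask (objective: alternative algorithm; return value proved identical).

-- ===== PORT A =====
-- the loop body: the elif chain updating the four has_* booleans
def pvAStep (st : Bool × Bool × Bool × Bool) (flag_val : Int) : Bool × Bool × Bool × Bool :=
  if flag_val = 0 then (true, st.2.1, st.2.2.1, st.2.2.2)
  else if flag_val = 1 then (st.1, true, st.2.2.1, st.2.2.2)
  else if flag_val = 2 then (st.1, st.2.1, true, st.2.2.2)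
  else if flag_val = 3 then (st.1, st.2.1, st.2.2.1, true)
  else st

def get_possible_variation_types_py (bound_flags : List Int) : List Int :=
  let st := bound_flags.foldl pvAStep (false, false, false, false)
  let p0 : List Int := [0, 1]
  let p1 := if st.1 then p0 ++ [2] ++ [4] else p0
  let p2 := if st.2.1 then p1 ++ [5] ++ [3] else p1
  let p3 := if st.2.2.1 then p2 ++ [7] ++ [9] else p2
  if st.2.2.2 then p3 ++ [6] ++ [8] else p3

-- ===== PORT B =====
-- Source B's _SUFFIX table, verbatim
def pvSuffix : List (List Int) :=
  [[], [2, 4], [5, 3], [2, 4, 5, 3],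
   [7, 9], [2, 4, 7, 9], [5, 3, 7, 9], [2, 4, 5, 3, 7, 9],
   [6, 8], [2, 4, 6, 8], [5, 3, 6, 8], [2, 4, 5, 3, 6, 8],
   [7, 9, 6, 8], [2, 4, 7, 9, 6, 8], [5, 3, 7, 9, 6, 8], [2, 4, 5, 3, 7, 9, 6, 8]]

-- the loop body: mask |= 1 << flag_val when 0 <= flag_val <= 3 (mask kept as Nat: the guard
-- makes the shift amount a small natural and the mask is always nonnegative in Python too)
def pvBStep (mask : Nat) (flag_val : Int) : Nat :=
  if 0 ≤ flag_val ∧ flag_val ≤ 3 then mask ||| (1 <<< flag_val.toNat) else mask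

def get_possible_variation_types_py_alt (bound_flags : List Int) : List Int :=
  let mask := bound_flags.foldl pvBStep 0
  -- _SUFFIX[mask]: mask < 16 always, so Python indexing never raises; getD default is unreachable
  [0, 1] ++ (pvSuffix.getD mask [])

-- ===== PRECONDITION & SPEC =====
def Spec_get_possible_variation_types_py (bound_flags : List Int) (out : List Int) : Prop := out = get_possible_variation_types_py_alt bound_flags
instance (bound_flags : List Int) (out : List Int) : Decidable (Spec_get_possible_variation_types_py bound_flags out) := by unfold Spec_get_possible_variation_types_py; infer_instance

-- ===== CLAIM (what is proved, stated in full; the proofs are below) =====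
def Claim_equal_get_possible_variation_types_py : Prop := ∀ (bound_flags : List Int), Dom_get_possible_variation_types_py bound_flags → Spec_get_possible_variation_types_py bound_flags (get_possible_variation_types_py bound_flags)

-- ===== LEMMAS AND PROOFS =====

-- A's four booleans, after the loop, are exactly the membership tests for 0,1,2,3
lemma pvA_foldl_eq (l : List Int) (a b c d : Bool) :
    l.foldl pvAStep (a, b, c, d) =
      (a || decide ((0:Int) ∈ l), b || decide ((1:Int) ∈ l),
       c || decide ((2:Int) ∈ l), d || decide ((3:Int) ∈ l)) := by
  induction l generalizing a b c d with
  | nil => simp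
  | cons x xs ih =>
    simp only [List.foldl_cons, pvAStep, List.mem_cons]
    split_ifs with h0 h1 h2 h3
    · subst h0; simp [ih]
    · subst h1; simp [ih]
    · subst h2; simp [ih]
    · subst h3; simp [ih]
    · simp [ih, decide_eq_false (Ne.symm h0), decide_eq_false (Ne.symm h1),
        decide_eq_false (Ne.symm h2), decide_eq_false (Ne.symm h3)]

-- the 4-bit mask determined by which of the flag values 0..3 occur in the list
def pvMask (l : List Int) : Nat :=
  (if (0:Int) ∈ l then 1 else 0) ||| (if (1:Int) ∈ l then 2 else 0) |||
  (if (2:Int) ∈ l then 4 else 0) ||| (if (3:Int) ∈ l then 8 else 0)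

-- B's mask, after the loop, is m OR the presence mask of the list
lemma pvB_foldl_eq (l : List Int) (m : Nat) :
    l.foldl pvBStep m = m ||| pvMask l := by
  induction l generalizing m with
  | nil => simp [pvMask]
  | cons x xs ih =>
    simp only [List.foldl_cons, ih, pvMask, List.mem_cons]
    by_cases h0 : x = 0
    · subst h0
      by_cases m0 : (0:Int) ∈ xs <;> by_cases m1 : (1:Int) ∈ xs <;>
        by_cases m2 : (2:Int) ∈ xs <;> by_cases m3 : (3:Int) ∈ xs <;>
        simp [pvBStep, m0, m1, m2, m3, Nat.or_assoc]
    · by_cases h1 : x = 1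
      · subst h1
        by_cases m0 : (0:Int) ∈ xs <;> by_cases m1 : (1:Int) ∈ xs <;>
          by_cases m2 : (2:Int) ∈ xs <;> by_cases m3 : (3:Int) ∈ xs <;>
          simp [pvBStep, m0, m1, m2, m3, Nat.or_assoc]
      · by_cases h2 : x = 2
        · subst h2
          by_cases m0 : (0:Int) ∈ xs <;> by_cases m1 : (1:Int) ∈ xs <;>
            by_cases m2 : (2:Int) ∈ xs <;> by_cases m3 : (3:Int) ∈ xs <;>
            simp [pvBStep, m0, m1, m2, m3, Nat.or_assoc]
        · by_cases h3 : x = 3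
          · subst h3
            by_cases m0 : (0:Int) ∈ xs <;> by_cases m1 : (1:Int) ∈ xs <;>
              by_cases m2 : (2:Int) ∈ xs <;> by_cases m3 : (3:Int) ∈ xs <;>
              simp [pvBStep, m0, m1, m2, m3, Nat.or_assoc]
          · have : ¬ (0 ≤ x ∧ x ≤ 3) := by omega
            simp [pvBStep, this, Ne.symm h0, Ne.symm h1, Ne.symm h2, Ne.symm h3]

-- ===== VERDICT (by name: the statement is the Claim_ definition above) =====
theorem get_possible_variation_types_py_spec : Claim_equal_get_possible_variation_types_py := by
  intro bound_flags _
  unfold Spec_get_possible_variation_types_py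
  unfold get_possible_variation_types_py get_possible_variation_types_py_alt
  simp only [pvA_foldl_eq, Bool.false_or, pvB_foldl_eq, Nat.zero_or, pvMask]
  by_cases m0 : (0:Int) ∈ bound_flags <;> by_cases m1 : (1:Int) ∈ bound_flags <;>
    by_cases m2 : (2:Int) ∈ bound_flags <;> by_cases m3 : (3:Int) ∈ bound_flags <;>
    simp [m0, m1, m2, m3, pvSuffix]
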